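-- pv_equiv track=rewrite | github.com/nafeesasultana24/AI_Document_Verification | verification/export_pdf.py | safe_text
-- ===== SOURCE A (Python) =====
-- def safe_text(text, max_word_len=40):
--     """
--     Breaks long unbroken words to avoid FPDF crash
--     """
--     words = text.split(" ")
--     safe_words = []
--
--     for word in words:
--         if len(word) > max_word_len:
--             # break long word
--             broken = "\n".join(
--                 [word[i:i+max_word_len] for i in range(0, len(word), max_word_len)]
--             )
--             safe_words.append(broken)
--         else:
--             safe_words.append(word)
--
--     return " ".join(safe_words)
-- ===== SOURCE B (Python) =====
-- def safe_text(text, max_word_len=40):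
--     """
--     Breaks long unbroken words to avoid FPDF crash.
--     Single left-to-right scan: spaces are copied through unchanged and each
--     maximal run of non-space characters is chunked in place -- no word list,
--     no split/join rebuild.
--     """
--     out = []
--     i, n = 0, len(text)
--     while i < n:
--         if text[i] == " ":
--             out.append(" ")
--             i += 1
--         else:
--             j = i
--             while j < n and text[j] != " ":
--                 j += 1
--             word = text[i:j]
--             if len(word) > max_word_len:
--                 out.append("\n".join(word[k:k + max_word_len]
--                                      for k in range(0, len(word), max_word_len)))
--             else:
--                 out.append(word)
--             i = j
--     return "".join(out)
-- ===== Notes on version B (the rewrite author's own statement) =====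
-- stated objective: alternative
-- what changed: Replaces A's split-on-space / per-word list rebuild / join pipeline by a single left-to-right scan of the characters that copies spaces through unchanged and chunks each maximal non-space run in place (no word list is ever built).
import Mathlib
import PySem

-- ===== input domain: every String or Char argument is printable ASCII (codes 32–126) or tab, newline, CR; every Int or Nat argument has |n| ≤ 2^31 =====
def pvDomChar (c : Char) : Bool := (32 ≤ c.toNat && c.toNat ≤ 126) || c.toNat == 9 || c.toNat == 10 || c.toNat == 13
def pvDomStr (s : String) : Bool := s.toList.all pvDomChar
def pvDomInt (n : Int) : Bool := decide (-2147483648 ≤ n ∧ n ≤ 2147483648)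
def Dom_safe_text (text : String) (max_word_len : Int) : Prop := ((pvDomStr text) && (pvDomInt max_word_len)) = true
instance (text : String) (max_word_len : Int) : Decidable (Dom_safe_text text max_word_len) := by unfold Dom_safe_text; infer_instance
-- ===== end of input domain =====

-- B replaces A's split(" ")/word-list/join(" ") rebuild by a single left-to-right scan that
-- copies spaces through and chunks each maximal non-space run in place (objective: alternative).


-- ===== PORT A =====
-- literal port of A: split on " ", chunk each too-long word via range(0, len, max), rejoin with " "
def safe_text (text : String) (max_word_len : Int) : String :=
  let words := PySem.Chars.splitOn text.toList [' ']
  let safe_words := words.foldl (fun acc word =>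
    if (word.length : Int) > max_word_len then
      let broken := PySem.Chars.join ['\n']
        ((PySem.List.pyRange 0 (word.length : Int) max_word_len).map
          (fun i => PySem.Chars.slice word (some i) (some (i + max_word_len))))
      acc ++ [broken]
    else acc ++ [word]) []
  String.mk (PySem.Chars.join [' '] safe_words)

-- ===== PORT B =====
-- B's chunker for one word (identical chunk expression to A's inner branch)
def pvRepl (max_word_len : Int) (word : List Char) : List Char :=
  if (word.length : Int) > max_word_len then
    PySem.Chars.join ['\n']
      ((PySem.List.pyRange 0 (word.length : Int) max_word_len).map
        (fun k => PySem.Chars.slice word (some k) (some (k + max_word_len))))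
  else word

-- Source B's while-loop: copy a space, or take the maximal non-space run (the inner j-scan,
-- rendered as takeWhile/dropWhile) and emit its chunked form, then continue after the run
def pvScan (m : Int) : List Char → List Char
  | [] => []
  | c :: rest =>
    if c = ' ' then c :: pvScan m rest
    else pvRepl m ((c :: rest).takeWhile (· ≠ ' ')) ++ pvScan m (rest.dropWhile (· ≠ ' '))
termination_by l => l.length
decreasing_by
  · simp
  · simp only [List.length_cons]
    have h2 := List.length_dropWhile_le (fun x => decide (x ≠ ' ')) rest
    omega

def safe_text_alt (text : String) (max_word_len : Int) : String :=
  String.mk (pvScan max_word_len text.toList)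

-- ===== PRECONDITION & SPEC =====
-- Pre_ excludes exactly the inputs on which Python A raises: max_word_len = 0 while some word
-- is non-empty (range(0, len, 0) raises ValueError); everywhere else A returns normally.
def Pre_safe_text (text : String) (max_word_len : Int) : Prop :=
  max_word_len ≠ 0 ∨ text.toList.all (· == ' ') = true
instance (text : String) (max_word_len : Int) : Decidable (Pre_safe_text text max_word_len) := by
  unfold Pre_safe_text; infer_instance

def pvWitness_safe_text : String × Int := ("hello world", 3)

def Spec_safe_text (text : String) (max_word_len : Int) (out : String) : Prop :=
  out = safe_text_alt text max_word_len
instance (text : String) (max_word_len : Int) (out : String) : Decidable (Spec_safe_text text max_word_len out) := by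
  unfold Spec_safe_text; infer_instance

-- ===== CLAIM (what is proved, stated in full; the proofs are below) =====
def Claim_equal_safe_text : Prop := ∀ (text : String) (max_word_len : Int), Dom_safe_text text max_word_len → Pre_safe_text text max_word_len → Spec_safe_text text max_word_len (safe_text text max_word_len)

-- ===== LEMMAS AND PROOFS =====

-- simple recursive model of text.split(" ")
def splitSp : List Char → List (List Char)
  | [] => [[]]
  | c :: t => if c = ' ' then [] :: splitSp t else (splitSp t).modifyHead (c :: ·)

theorem splitSp_ne_nil (l : List Char) : splitSp l ≠ [] := by
  induction l with
  | nil => simp [splitSp]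
  | cons c t ih =>
    simp only [splitSp]
    split
    · simp
    · cases h : splitSp t with
      | nil => exact absurd h ih
      | cons a t' => simp [List.modifyHead]

theorem go_eq (fuel : Nat) : ∀ (l cur : List Char) (acc : List (List Char)), l.length ≤ fuel →
    PySem.Chars.splitOn.go [' '] fuel l cur acc
      = acc.reverse ++ (splitSp l).modifyHead (cur.reverse ++ ·) := by
  induction fuel with
  | zero =>
    intro l cur acc hl
    have : l = [] := List.eq_nil_of_length_eq_zero (Nat.le_zero.mp hl)
    subst this
    simp [PySem.Chars.splitOn.go, splitSp, List.modifyHead]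
  | succ fuel ih =>
    intro l cur acc hl
    cases l with
    | nil => simp [PySem.Chars.splitOn.go, splitSp, List.modifyHead]
    | cons c rest =>
      by_cases hc : c = ' '
      · subst hc
        have hpre : List.isPrefixOf [' '] (' ' :: rest) = true := by simp [List.isPrefixOf]
        simp only [PySem.Chars.splitOn.go, hpre, if_true, List.length_cons] at *
        have hdp : List.drop (([] : List Char).length + 1) (' ' :: rest) = rest := rfl
        rw [hdp, ih rest [] (List.reverse cur :: acc) (by omega)]
        cases h : splitSp rest with
        | nil => exact absurd h (splitSp_ne_nil rest)
        | cons a t' => simp [splitSp, List.modifyHead, h]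
      · have hpre : List.isPrefixOf [' '] (c :: rest) = false := by
          simp [List.isPrefixOf]; exact fun h => (hc h.symm).elim
        simp only [PySem.Chars.splitOn.go, hpre, Bool.false_eq_true, if_false] at *
        rw [ih rest (c :: cur) acc (by simp at hl; omega)]
        cases h : splitSp rest with
        | nil => exact absurd h (splitSp_ne_nil rest)
        | cons a t' => simp [splitSp, hc, List.modifyHead, h]

theorem splitOn_space (l : List Char) : PySem.Chars.splitOn l [' '] = splitSp l := by
  unfold PySem.Chars.splitOn
  rw [go_eq (l.length + 1) l [] [] (by omega)]
  cases h : splitSp l with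
  | nil => exact absurd h (splitSp_ne_nil l)
  | cons a t' => simp [List.modifyHead]

theorem pvRepl_nil (m : Int) : pvRepl m [] = [] := by
  unfold pvRepl
  split
  · have h0 : PySem.List.pyRange 0 ((([] : List Char).length : Int)) m = [] := by
      simp only [List.length_nil, Int.natCast_zero]
      unfold PySem.List.pyRange
      split
      · rfl
      · split <;> simp_all
    rw [h0]; simp [PySem.Chars.join, List.intercalate]
  · rfl

-- A's output on the word list, as a function of the raw characters
def pvG (m : Int) (l : List Char) : List Char :=
  PySem.Chars.join [' '] ((splitSp l).map (pvRepl m))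

theorem pvG_nil (m : Int) : pvG m [] = [] := by
  simp [pvG, splitSp, pvRepl_nil, PySem.Chars.join, List.intercalate]

theorem join_cons_cons' (sep : List Char) (a b : List Char) (t : List (List Char)) :
    PySem.Chars.join sep (a :: b :: t) = a ++ sep ++ PySem.Chars.join sep (b :: t) := by
  simp [PySem.Chars.join, List.intercalate, List.intersperse]

theorem pvG_space (m : Int) (t : List Char) : pvG m (' ' :: t) = ' ' :: pvG m t := by
  unfold pvG
  simp only [splitSp, if_true, List.map_cons, pvRepl_nil]
  cases h : splitSp t with
  | nil => exact absurd h (splitSp_ne_nil t)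
  | cons a t' => simp only [List.map_cons]; rw [join_cons_cons']; simp

def splitSpTail : List Char → List (List Char)
  | [] => []
  | _ :: r => splitSp r

theorem splitSp_eq_take_drop (l : List Char) :
    splitSp l = l.takeWhile (· ≠ ' ') :: splitSpTail (l.dropWhile (· ≠ ' ')) := by
  induction l with
  | nil => simp [splitSp, splitSpTail]
  | cons c t ih =>
    by_cases hc : c = ' '
    · subst hc
      simp [splitSp, splitSpTail]
    · simp only [splitSp, List.takeWhile_cons, List.dropWhile_cons, ne_eq, ih, List.modifyHead]
      simp [hc]

theorem pvG_run (m : Int) (c : Char) (t : List Char) (hc : c ≠ ' ') :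
    pvG m (c :: t) = pvRepl m ((c :: t).takeWhile (· ≠ ' ')) ++ pvG m (t.dropWhile (· ≠ ' ')) := by
  have hdrop : (c :: t).dropWhile (· ≠ ' ') = t.dropWhile (· ≠ ' ') := by
    simp [hc]
  unfold pvG
  rw [splitSp_eq_take_drop (c :: t), hdrop]
  cases hr : t.dropWhile (· ≠ ' ') with
  | nil => simp [splitSpTail, splitSp, pvRepl_nil, PySem.Chars.join, List.intercalate]
  | cons e r' =>
    have he : e = ' ' := by
      have := List.head?_dropWhile_not (fun x => decide (x ≠ ' ')) t
      rw [hr] at this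
      simpa using this
    subst he
    simp only [splitSpTail, List.map_cons]
    cases h : splitSp r' with
    | nil => exact absurd h (splitSp_ne_nil r')
    | cons a t' =>
      simp only [List.map_cons]
      rw [join_cons_cons']
      conv_rhs => rw [show splitSp (' ' :: r') = [] :: splitSp r' from by simp [splitSp], h]
      simp only [List.map_cons, pvRepl_nil]
      rw [join_cons_cons']
      simp

theorem pvScan_eq_pvG (m : Int) (l : List Char) : pvScan m l = pvG m l := by
  induction l using pvScan.induct with
  | case1 => simp [pvScan, pvG_nil]
  | case2 rest ih =>
    simp only [pvScan, if_true]
    rw [pvG_space, ih]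
  | case3 c rest hc ih =>
    simp only [pvScan]
    rw [if_neg hc, pvG_run m c rest hc, ih]

theorem foldl_words (m : Int) (ws : List (List Char)) : ∀ acc : List (List Char),
    ws.foldl (fun acc word =>
      if (word.length : Int) > m then
        acc ++ [PySem.Chars.join ['\n']
          ((PySem.List.pyRange 0 (word.length : Int) m).map
            (fun i => PySem.Chars.slice word (some i) (some (i + m))))]
      else acc ++ [word]) acc = acc ++ ws.map (pvRepl m) := by
  induction ws with
  | nil => intro acc; simp
  | cons w ws ih =>
    intro acc
    simp only [List.foldl_cons, List.map_cons]
    rw [ih]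
    unfold pvRepl
    split <;> simp

-- ===== VERDICT (by name: the statement is the Claim_ definition above) =====
theorem safe_text_spec : Claim_equal_safe_text := by
  intro text m _ _
  unfold Spec_safe_text
  simp only [safe_text, safe_text_alt, foldl_words, splitOn_space, pvScan_eq_pvG, pvG,
    List.nil_append]
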